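-- pv_equiv track=rewrite | github.com/brhenri-mr/Dimensionamento-de-Viga | BackEnd/dimensionamento/core/Auxiliar/Rigidez_Direita.py | ordenar_forcas
-- ===== SOURCE A (Python) =====
-- def ordenar_forcas(forcas, des):
--     """
--     Ordena o vetor de forças em funcao do filtro de deslocabilidades
--     forcas: vetor de forcas do sistema
--     des: filtro de deslocamentos
--     """
--     r = []
--     for i in range(len(des)):
--         if des[i] != 0:
--             r.append(forcas[i])
--     for i in range(len(des)):
--         if des[i] == 0:
--             r.append(forcas[i])
--     return r
-- ===== SOURCE B (Python) =====
-- def ordenar_forcas(forcas, des):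
--     """
--     Ordena o vetor de forças em funcao do filtro de deslocabilidades
--     forcas: vetor de forcas do sistema
--     des: filtro de deslocamentos
--     """
--     keep = []
--     rest = []
--     for i in range(len(des)):
--         if des[i] != 0:
--             keep.append(forcas[i])
--         else:
--             rest.append(forcas[i])
--     return keep + rest
-- ===== Notes on version B (the rewrite author's own statement) =====
-- stated objective: simpler
-- what changed: Replaces A's two sequential filtering passes over the index range by a single pass maintaining two accumulators (keep/rest) and concatenating them at the end.
import Mathlib
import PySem

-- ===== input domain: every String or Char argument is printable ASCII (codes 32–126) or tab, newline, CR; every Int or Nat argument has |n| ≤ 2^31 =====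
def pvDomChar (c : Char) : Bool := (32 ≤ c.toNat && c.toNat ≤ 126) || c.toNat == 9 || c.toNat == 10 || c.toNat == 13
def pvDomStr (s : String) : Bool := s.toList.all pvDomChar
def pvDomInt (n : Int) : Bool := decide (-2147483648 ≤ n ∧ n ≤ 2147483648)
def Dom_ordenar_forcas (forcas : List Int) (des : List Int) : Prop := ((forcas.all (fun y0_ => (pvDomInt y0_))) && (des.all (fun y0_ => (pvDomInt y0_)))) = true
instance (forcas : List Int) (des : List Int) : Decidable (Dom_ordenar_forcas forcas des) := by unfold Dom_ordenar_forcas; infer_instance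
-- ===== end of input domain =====

-- B does the same partition in one pass with two accumulators instead of A's two filtering passes; return value only, no mutation.

-- ===== PORT A =====
-- two passes over range(len(des)); forcas[i]/des[i] are in range under Pre_ (pyGetD default never used there)
def ordenar_forcas (forcas : List Int) (des : List Int) : List Int :=
  let r := (PySem.List.pyRange 0 des.length 1).foldl
    (fun r i => if PySem.List.pyGetD des i 0 ≠ 0 then r ++ [PySem.List.pyGetD forcas i 0] else r) []
  let r := (PySem.List.pyRange 0 des.length 1).foldl
    (fun r i => if PySem.List.pyGetD des i 0 = 0 then r ++ [PySem.List.pyGetD forcas i 0] else r) r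
  r

-- ===== PORT B =====
-- one pass, two accumulators, concatenated at the end
def ordenar_forcas_alt (forcas : List Int) (des : List Int) : List Int :=
  let p := (PySem.List.pyRange 0 des.length 1).foldl
    (fun (p : List Int × List Int) i =>
      if PySem.List.pyGetD des i 0 ≠ 0 then (p.1 ++ [PySem.List.pyGetD forcas i 0], p.2)
      else (p.1, p.2 ++ [PySem.List.pyGetD forcas i 0])) ([], [])
  p.1 ++ p.2

-- ===== PRECONDITION & SPEC =====
-- Pre_ excludes exactly the inputs where both Pythons raise IndexError: des longer than forcas.
def Pre_ordenar_forcas (forcas : List Int) (des : List Int) : Prop := des.length ≤ forcas.length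
instance (forcas : List Int) (des : List Int) : Decidable (Pre_ordenar_forcas forcas des) := by unfold Pre_ordenar_forcas; infer_instance
def pvWitness_ordenar_forcas : List Int × List Int := ([3, -1, 4], [1, 0, 2])
def Spec_ordenar_forcas (forcas : List Int) (des : List Int) (out : List Int) : Prop := out = ordenar_forcas_alt forcas des
instance (forcas : List Int) (des : List Int) (out : List Int) : Decidable (Spec_ordenar_forcas forcas des out) := by unfold Spec_ordenar_forcas; infer_instance

-- ===== CLAIM (what is proved, stated in full; the proofs are below) =====
def Claim_equal_ordenar_forcas : Prop := ∀ (forcas : List Int) (des : List Int), Dom_ordenar_forcas forcas des → Pre_ordenar_forcas forcas des → Spec_ordenar_forcas forcas des (ordenar_forcas forcas des)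

-- ===== LEMMAS AND PROOFS =====

-- B's paired fold from (k, r) is A's two folds appended to k and r respectively (over any index list).
theorem pair_fold_split (forcas des : List Int) (l : List Int) (k r : List Int) :
    l.foldl (fun (p : List Int × List Int) i =>
      if PySem.List.pyGetD des i 0 ≠ 0 then (p.1 ++ [PySem.List.pyGetD forcas i 0], p.2)
      else (p.1, p.2 ++ [PySem.List.pyGetD forcas i 0])) (k, r)
    = (l.foldl (fun r i => if PySem.List.pyGetD des i 0 ≠ 0 then r ++ [PySem.List.pyGetD forcas i 0] else r) k,
       l.foldl (fun r i => if PySem.List.pyGetD des i 0 = 0 then r ++ [PySem.List.pyGetD forcas i 0] else r) r) := by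
  induction l generalizing k r with
  | nil => rfl
  | cons i t ih =>
    by_cases h : PySem.List.pyGetD des i 0 = 0
    · simp only [List.foldl_cons, ne_eq, h, not_true_eq_false, ite_false, ite_true]
      exact ih _ _
    · simp only [List.foldl_cons, ne_eq, h, not_false_eq_true, ite_true, ite_false]
      exact ih _ _


-- ===== VERDICT (by name: the statement is the Claim_ definition above) =====
theorem ordenar_forcas_spec : Claim_equal_ordenar_forcas := by
  intro forcas des _ _
  unfold Spec_ordenar_forcas ordenar_forcas ordenar_forcas_alt
  rw [pair_fold_split]
  simp only [PySem.List.foldl_append_ite, List.nil_append]
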